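-- pv_equiv track=rewrite | github.com/Foundation-for-Puerto-Rico/corpus-rag | reindex.py | diff_files
-- ===== SOURCE A (Python) =====
-- def diff_files(
--     current: dict[str, dict],
--     manifest: dict,
-- ) -> tuple[set[str], set[str], set[str]]:
--     """Compare current files against manifest.
--
--     Returns:
--         (new_files, modified_files, deleted_files) — each a set of filenames.
--     """
--     manifest_files = manifest.get("files", {})
--     current_names = set(current.keys())
--     manifest_names = set(manifest_files.keys())
--
--     new = current_names - manifest_names
--     deleted = manifest_names - current_names
--
--     modified = set()
--     for name in current_names & manifest_names:
--         cur = current[name]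
--         prev = manifest_files[name]
--         # Quick check: mtime unchanged → skip MD5
--         if cur["mtime"] == prev.get("mtime"):
--             continue
--         # mtime changed — verify with MD5
--         if cur["md5"] != prev.get("md5"):
--             modified.add(name)
--
--     return new, modified, deleted
-- ===== SOURCE B (Python) =====
-- def diff_files(
--     current: dict[str, dict],
--     manifest: dict,
-- ) -> tuple[set[str], set[str], set[str]]:
--     """Full outer join: build one joined table name -> [cur_record, prev_record]
--     (None marks absence on that side), then classify each joined row once."""
--     manifest_files = manifest.get("files", {})
--
--     joined = {}
--     for name, cur in current.items():
--         joined[name] = [cur, None]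
--     for name, prev in manifest_files.items():
--         if name in joined:
--             joined[name] = [joined[name][0], prev]
--         else:
--             joined[name] = [None, prev]
--
--     new, modified, deleted = set(), set(), set()
--     for name, (cur, prev) in joined.items():
--         if prev is None:
--             new.add(name)
--         elif cur is None:
--             deleted.add(name)
--         elif cur["mtime"] != prev.get("mtime") and cur["md5"] != prev.get("md5"):
--             modified.add(name)
--     return new, modified, deleted
-- ===== Notes on version B (the rewrite author's own statement) =====
-- stated objective: alternative
-- what changed: Replaces A's set algebra over key sets (two set differences plus a loop over the intersection with dict lookups on both sides) by a hash full-outer-join: one joined table mapping every name to its (current record, manifest record) pair with None marking absence is built first, and a single classification pass over the joined rows then decides new/modified/deleted per row with no further lookups and no key-set operations.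
import Mathlib
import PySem

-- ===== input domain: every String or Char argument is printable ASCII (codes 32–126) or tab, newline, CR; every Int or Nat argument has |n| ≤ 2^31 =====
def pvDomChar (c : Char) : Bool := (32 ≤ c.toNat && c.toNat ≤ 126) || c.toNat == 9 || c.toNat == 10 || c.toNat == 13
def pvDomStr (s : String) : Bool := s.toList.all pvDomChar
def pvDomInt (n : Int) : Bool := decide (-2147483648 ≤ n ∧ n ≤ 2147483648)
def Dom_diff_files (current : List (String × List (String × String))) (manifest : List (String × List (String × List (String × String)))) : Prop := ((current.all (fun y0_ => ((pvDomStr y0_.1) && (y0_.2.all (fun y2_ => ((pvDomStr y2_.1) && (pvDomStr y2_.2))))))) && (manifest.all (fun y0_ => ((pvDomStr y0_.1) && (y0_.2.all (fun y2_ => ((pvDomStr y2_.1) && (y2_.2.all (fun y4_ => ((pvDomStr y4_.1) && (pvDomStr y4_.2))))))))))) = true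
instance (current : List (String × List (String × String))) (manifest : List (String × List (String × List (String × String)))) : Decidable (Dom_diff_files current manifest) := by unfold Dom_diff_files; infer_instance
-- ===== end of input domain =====

-- B replaces A's key-set algebra (two set differences plus a loop over the intersection
-- with lookups into both dicts) by a hash full-outer-join: one joined table
-- name -> (current record?, manifest record?) built first, then a single classification
-- pass over the joined rows; same cost, alternative algorithm.

-- a file record: dict[str, str]
abbrev PRec : Type := List (String × String)

-- manifest.get("files", {}) — shared by both ports and by Pre_
def mfilesOf (manifest : List (String × List (String × List (String × String)))) : List (String × PRec) :=
  ((PySem.Dict.mk manifest).get? "files").getD []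

-- ===== PORT A =====
-- the body of A's 'for name in current_names & manifest_names' loop
def modStep (current : List (String × PRec)) (manifest_files : List (String × PRec)) (acc : PySem.Set String) (name : String) : PySem.Set String :=
  let cur := ((PySem.Dict.mk current).get? name).getD []
  let prev := ((PySem.Dict.mk manifest_files).get? name).getD []
  match (PySem.Dict.mk cur).get? "mtime" with
  | none => acc  -- Python raises KeyError here; excluded by Pre_
  | some m =>
    if some m = (PySem.Dict.mk prev).get? "mtime" then acc
    else
      match (PySem.Dict.mk cur).get? "md5" with
      | none => acc  -- Python raises KeyError here; excluded by Pre_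
      | some d =>
        if some d ≠ (PySem.Dict.mk prev).get? "md5" then PySem.Set.add acc name else acc

def diff_files (current : List (String × PRec)) (manifest : List (String × List (String × PRec))) : List String × List String × List String :=
  let manifest_files := mfilesOf manifest
  let current_names : PySem.Set String := PySem.Set.ofList (current.map Prod.fst)
  let manifest_names : PySem.Set String := PySem.Set.ofList (manifest_files.map Prod.fst)
  let newF := PySem.Set.diff current_names manifest_names
  let deleted := PySem.Set.diff manifest_names current_names
  let modified := (PySem.Set.inter current_names manifest_names).foldl
    (modStep current manifest_files) PySem.Set.empty
  (newF, modified, deleted)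

-- ===== PORT B =====
-- B's second join loop: 'if name in joined: joined[name] = [joined[name][0], prev] else: joined[name] = [None, prev]'
def joinStep (d : PySem.Dict String (Option PRec × Option PRec)) (q : String × PRec) : PySem.Dict String (Option PRec × Option PRec) :=
  if d.contains q.1 then d.insert q.1 ((d.getD q.1 (none, none)).1, some q.2)
  else d.insert q.1 (none, some q.2)

-- B's classification of one joined row (name, (cur?, prev?))
def clStep (acc : List String × List String × List String) (p : String × (Option PRec × Option PRec)) : List String × List String × List String :=
  match p.2.2 with
  | none => (PySem.Set.add acc.1 p.1, acc.2.1, acc.2.2)    -- prev is None → new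
  | some prev =>
    match p.2.1 with
    | none => (acc.1, acc.2.1, PySem.Set.add acc.2.2 p.1)  -- cur is None → deleted
    | some cur =>
      match (PySem.Dict.mk cur).get? "mtime" with
      | none => acc  -- Python raises KeyError here; excluded by Pre_
      | some m =>
        if some m ≠ (PySem.Dict.mk prev).get? "mtime" then
          match (PySem.Dict.mk cur).get? "md5" with
          | none => acc  -- Python raises KeyError here; excluded by Pre_
          | some dg =>
            if some dg ≠ (PySem.Dict.mk prev).get? "md5" then (acc.1, PySem.Set.add acc.2.1 p.1, acc.2.2)
            else acc
        else acc

def diff_files_alt (current : List (String × PRec)) (manifest : List (String × List (String × PRec))) : List String × List String × List String :=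
  let manifest_files := mfilesOf manifest
  -- joined = {}; for name, cur in current.items(): joined[name] = [cur, None]
  let joined0 := current.foldl (fun d p => d.insert p.1 (some p.2, (none : Option PRec))) PySem.Dict.empty
  -- for name, prev in manifest_files.items(): …
  let joined := manifest_files.foldl joinStep joined0
  -- single classification pass over the joined rows
  joined.items.foldl clStep (PySem.Set.empty, PySem.Set.empty, PySem.Set.empty)

-- ===== PRECONDITION & SPEC =====
-- Pre_ excludes (a) association lists with duplicate keys in current or in manifest["files"],
-- which do not represent a Python dict (the dict built from them makes first-vs-last-match
-- accidental), and (b) inputs where a current record shared with the manifest lacks the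
-- "mtime" key (or lacks "md5" when the mtime differs), on which the Python A raises KeyError.
def Pre_diff_files (current : List (String × List (String × String))) (manifest : List (String × List (String × List (String × String)))) : Prop :=
  (current.map Prod.fst).Nodup ∧ ((mfilesOf manifest).map Prod.fst).Nodup ∧
  ∀ p ∈ current, (((PySem.Dict.mk (mfilesOf manifest)).get? p.1).all (fun prev =>
      ((PySem.Dict.mk p.2).get? "mtime").isSome &&
      (((PySem.Dict.mk p.2).get? "mtime" == (PySem.Dict.mk prev).get? "mtime") ||
        ((PySem.Dict.mk p.2).get? "md5").isSome))) = true
instance (current : List (String × List (String × String))) (manifest : List (String × List (String × List (String × String)))) : Decidable (Pre_diff_files current manifest) := by unfold Pre_diff_files; infer_instance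

def pvWitness_diff_files : (List (String × List (String × String))) × (List (String × List (String × List (String × String)))) :=
  ([("a", [("mtime", "1"), ("md5", "x")]), ("c", [])],
   [("files", [("a", [("mtime", "2"), ("md5", "y")]), ("b", [("mtime", "3")])])])

def Spec_diff_files (current : List (String × List (String × String))) (manifest : List (String × List (String × List (String × String)))) (out : List String × List String × List String) : Prop := out = diff_files_alt current manifest
instance (current : List (String × List (String × String))) (manifest : List (String × List (String × List (String × String)))) (out : List String × List String × List String) : Decidable (Spec_diff_files current manifest out) := by unfold Spec_diff_files; infer_instance

-- ===== CLAIM (what is proved, stated in full; the proofs are below) =====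
def Claim_equal_diff_files : Prop := ∀ (current : List (String × List (String × String))) (manifest : List (String × List (String × List (String × String)))), Dom_diff_files current manifest → Pre_diff_files current manifest → Spec_diff_files current manifest (diff_files current manifest)

-- ===== LEMMAS AND PROOFS =====

-- the per-name "modified" test, as both programs evaluate it once the name is shared
def condMod (current : List (String × PRec)) (mf : List (String × PRec)) (n : String) : Bool :=
  match (PySem.Dict.mk mf).get? n with
  | none => false
  | some prev =>
    match (PySem.Dict.mk (((PySem.Dict.mk current).get? n).getD [])).get? "mtime" with
    | none => false
    | some m =>
      if some m = (PySem.Dict.mk prev).get? "mtime" then false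
      else
        match (PySem.Dict.mk (((PySem.Dict.mk current).get? n).getD [])).get? "md5" with
        | none => false
        | some d => decide (some d ≠ (PySem.Dict.mk prev).get? "md5")

-- the canonical value both programs compute, given unique keys
def canonOf (current : List (String × PRec)) (mf : List (String × PRec)) : List String × List String × List String :=
  ((current.map Prod.fst).filter (fun n => ((PySem.Dict.mk mf).get? n).isNone),
   (current.map Prod.fst).filter (condMod current mf),
   (mf.map Prod.fst).filter (fun n => !((PySem.Dict.mk current).contains n)))

lemma get?_mk_eq_none_iff {ν : Type} (mf : List (String × ν)) (n : String) :
    (PySem.Dict.mk mf).get? n = none ↔ n ∉ mf.map Prod.fst := by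
  have h := PySem.Dict.get?_eq_none_iff_not_mem_keys (d := PySem.Dict.mk mf) (k := n)
  simp only [PySem.Dict.keys] at h
  exact h


lemma set_diff_eq_filter (s t : List String) :
    PySem.Set.diff s t = s.filter (fun x => !(PySem.Set.contains t x)) := by
  simp [PySem.Set.diff]

lemma set_inter_eq_filter (s t : List String) :
    PySem.Set.inter s t = s.filter (fun x => PySem.Set.contains t x) := by
  simp [PySem.Set.inter]

lemma set_contains_eq (t : List String) (x : String) :
    PySem.Set.contains t x = decide (x ∈ t) := by
  simp [PySem.Set.contains]

-- a guarded Set.add loop over distinct fresh names appends the filtered names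
lemma foldl_add_if_filter (p : String → Bool) :
    ∀ (l : List String) (acc : List String), l.Nodup → (∀ n ∈ l, n ∉ acc) →
      l.foldl (fun acc n => if p n then PySem.Set.add acc n else acc) acc = acc ++ l.filter p := by
  intro l
  induction l with
  | nil => simp
  | cons n t ih =>
    intro acc hnd hfr
    rw [List.nodup_cons] at hnd
    rw [List.foldl_cons, List.filter_cons]
    by_cases hp : p n = true
    · rw [if_pos hp, if_pos hp, PySem.Set.add_of_not_mem (hfr n (List.mem_cons_self ..)),
        ih (acc ++ [n]) hnd.2 (by
          intro m hm
          simp only [List.mem_append, List.mem_singleton]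
          rintro (h | rfl)
          · exact hfr m (List.mem_cons_of_mem _ hm) h
          · exact hnd.1 hm)]
      simp
    · rw [if_neg hp, if_neg hp, ih acc hnd.2 (fun m hm => hfr m (List.mem_cons_of_mem _ hm))]

-- B's second join loop, characterised at the items level: every existing row gets its
-- manifest component filled in, manifest-only names are appended as (None, prev) rows
lemma items_join2 (mf : List (String × PRec)) :
    ∀ (d : PySem.Dict String (Option PRec × Option PRec)),
      d.keys.Nodup → (mf.map Prod.fst).Nodup →
      (mf.foldl joinStep d).items
        = d.items.map (fun e => (e.1, (e.2.1, ((PySem.Dict.mk mf).get? e.1).elim e.2.2 some)))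
          ++ (mf.filter (fun q => !(d.contains q.1))).map (fun q => (q.1, ((none : Option PRec), some q.2))) := by
  induction mf with
  | nil =>
    intro d _ _
    simp [show (PySem.Dict.mk ([] : List (String × PRec))) = PySem.Dict.empty from rfl,
      PySem.Dict.get?_empty]
  | cons q rest ih =>
    obtain ⟨qk, qv⟩ := q
    intro d hnd hmf
    rw [List.map_cons, List.nodup_cons] at hmf
    have hq_rest : (PySem.Dict.mk rest).get? qk = none := (get?_mk_eq_none_iff rest qk).mpr hmf.1
    rw [List.foldl_cons, List.filter_cons]
    cases hc : d.contains qk with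
    | true =>
      have hj : joinStep d (qk, qv) = d.insert qk ((d.getD qk (none, none)).1, some qv) := by
        simp [joinStep, hc]
      have hk' : (d.insert qk ((d.getD qk (none, none)).1, some qv)).keys = d.keys :=
        PySem.Dict.keys_insert_of_contains d _ hc
      rw [hj, ih _ (hk' ▸ hnd) hmf.2, PySem.Dict.items_insert_of_contains d _ hc, List.map_map]
      have hmap : ∀ e ∈ d.items,
          ((fun e => (e.1, (e.2.1, ((PySem.Dict.mk rest).get? e.1).elim e.2.2 some))) ∘
            (fun p => if (p.1 == qk) = true then (qk, ((d.getD qk (none, none)).1, some qv)) else p)) e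
          = (e.1, (e.2.1, ((PySem.Dict.mk ((qk, qv) :: rest)).get? e.1).elim e.2.2 some)) := by
        intro e he
        by_cases heq : e.1 = qk
        · have hgd : d.getD qk (none, none) = e.2 :=
            PySem.Dict.getD_of_mem_items d (by simpa [← heq] using he) hnd _
          simp [Function.comp, heq, hgd, PySem.Dict.get?_mk_cons, hq_rest]
        · simp [Function.comp, heq, PySem.Dict.get?_mk_cons, Ne.symm heq]
      rw [List.map_congr_left hmap]
      rw [if_neg (by simp)]
      have hfilt : List.filter (fun r => !(d.insert qk ((d.getD qk (none, none)).1, some qv)).contains r.1) rest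
          = List.filter (fun r => !d.contains r.1) rest := by
        apply List.filter_congr
        intro r hr
        have hrq : r.1 ≠ qk := fun h => hmf.1 (by rw [← h]; exact List.mem_map.mpr ⟨r, hr, rfl⟩)
        rw [PySem.Dict.contains_insert]
        simp [hrq]
      rw [hfilt]
    | false =>
      have hj : joinStep d (qk, qv) = d.insert qk ((none : Option PRec), some qv) := by
        simp [joinStep, hc]
      have hnotmem : qk ∉ d.keys := by
        intro h
        rw [(PySem.Dict.contains_iff_mem_keys d qk).mpr h] at hc
        cases hc
      have hk' : (d.insert qk ((none : Option PRec), some qv)).keys = d.keys ++ [qk] :=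
        PySem.Dict.keys_insert_of_not_contains d _ hc
      have hnd' : (d.insert qk ((none : Option PRec), some qv)).keys.Nodup := by
        rw [hk']
        simpa [List.nodup_append] using ⟨hnd, fun a ha h => hnotmem (h ▸ ha)⟩
      rw [hj, ih _ hnd' hmf.2, PySem.Dict.items_insert_of_not_contains d _ hc, List.map_append]
      have hmap : ∀ e ∈ d.items,
          (fun e => (e.1, (e.2.1, ((PySem.Dict.mk rest).get? e.1).elim e.2.2 some))) e
          = (e.1, (e.2.1, ((PySem.Dict.mk ((qk, qv) :: rest)).get? e.1).elim e.2.2 some)) := by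
        intro e he
        have heq : e.1 ≠ qk := by
          intro h
          apply hnotmem
          rw [← h]
          simp only [PySem.Dict.keys]
          exact List.mem_map_of_mem (f := Prod.fst) he
        simp [PySem.Dict.get?_mk_cons, Ne.symm heq]
      rw [List.map_congr_left hmap]
      rw [if_pos (by simp)]
      have hfilt : List.filter (fun r => !(d.insert qk ((none : Option PRec), some qv)).contains r.1) rest
          = List.filter (fun r => !d.contains r.1) rest := by
        apply List.filter_congr
        intro r hr
        have hrq : r.1 ≠ qk := fun h => hmf.1 (by rw [← h]; exact List.mem_map.mpr ⟨r, hr, rfl⟩)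
        rw [PySem.Dict.contains_insert]
        simp [hrq]
      rw [hfilt, List.append_assoc]
      congr 1
      simp [hq_rest]

-- B's classification pass over the current-side joined rows
lemma cfold_eq (current mf : List (String × PRec)) :
    ∀ (l : List (String × PRec)) (a b c : List String),
      (l.map Prod.fst).Nodup →
      (∀ p ∈ l, (PySem.Dict.mk current).get? p.1 = some p.2) →
      (∀ p ∈ l, p.1 ∉ a) → (∀ p ∈ l, p.1 ∉ b) →
      l.foldl (fun acc p => clStep acc (p.1, (some p.2, (PySem.Dict.mk mf).get? p.1))) (a, b, c)
      = (a ++ (l.map Prod.fst).filter (fun n => ((PySem.Dict.mk mf).get? n).isNone),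
         b ++ (l.map Prod.fst).filter (condMod current mf),
         c) := by
  intro l
  induction l with
  | nil => simp
  | cons p r ih =>
    intro a b c hnd hlk hfa hfb
    rw [List.map_cons, List.nodup_cons] at hnd
    have hfa' : ∀ q ∈ r, q.1 ∉ a := fun q hq => hfa q (List.mem_cons_of_mem _ hq)
    have hfb' : ∀ q ∈ r, q.1 ∉ b := fun q hq => hfb q (List.mem_cons_of_mem _ hq)
    have hlk' : ∀ q ∈ r, (PySem.Dict.mk current).get? q.1 = some q.2 :=
      fun q hq => hlk q (List.mem_cons_of_mem _ hq)
    have hcons := hlk p (List.mem_cons_self ..)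
    have hfraN : ∀ q ∈ r, q.1 ∉ a ++ [p.1] := by
      intro q hq
      simp only [List.mem_append, List.mem_singleton]
      rintro (h | h1)
      · exact hfa' q hq h
      · exact hnd.1 (h1 ▸ List.mem_map_of_mem hq)
    have hfrbN : ∀ q ∈ r, q.1 ∉ b ++ [p.1] := by
      intro q hq
      simp only [List.mem_append, List.mem_singleton]
      rintro (h | h1)
      · exact hfb' q hq h
      · exact hnd.1 (h1 ▸ List.mem_map_of_mem hq)
    rw [List.foldl_cons, List.map_cons, List.filter_cons, List.filter_cons]
    cases hmf : (PySem.Dict.mk mf).get? p.1 with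
    | none =>
      have hMod : condMod current mf p.1 = false := by simp [condMod, hmf]
      have hstep : clStep (a, b, c) (p.1, (some p.2, none)) = (a ++ [p.1], b, c) := by
        simp [clStep, PySem.Set.add_of_not_mem (hfa p (List.mem_cons_self ..))]
      rw [hstep, ih (a ++ [p.1]) b c hnd.2 hlk' hfraN hfb']
      simp [hMod]
    | some prev =>
      cases hmt : (PySem.Dict.mk p.2).get? "mtime" with
      | none =>
        have hMod : condMod current mf p.1 = false := by simp [condMod, hmf, hcons, hmt]
        have hstep : clStep (a, b, c) (p.1, (some p.2, some prev)) = (a, b, c) := by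
          simp [clStep, hmt]
        rw [hstep, ih a b c hnd.2 hlk' hfa' hfb']
        simp [hMod]
      | some m =>
        by_cases hme : some m = (PySem.Dict.mk prev).get? "mtime"
        · have hMod : condMod current mf p.1 = false := by
            simp [condMod, hmf, hcons, hmt, eq_true hme]
          have hstep : clStep (a, b, c) (p.1, (some p.2, some prev)) = (a, b, c) := by
            simp [clStep, hmt, eq_true hme]
          rw [hstep, ih a b c hnd.2 hlk' hfa' hfb']
          simp [hMod]
        · cases hmd : (PySem.Dict.mk p.2).get? "md5" with
          | none =>
            have hMod : condMod current mf p.1 = false := by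
              simp [condMod, hmf, hcons, hmt, eq_false hme, hmd]
            have hstep : clStep (a, b, c) (p.1, (some p.2, some prev)) = (a, b, c) := by
              simp [clStep, hmt, eq_false hme, hmd]
            rw [hstep, ih a b c hnd.2 hlk' hfa' hfb']
            simp [hMod]
          | some dg =>
            by_cases hde : some dg = (PySem.Dict.mk prev).get? "md5"
            · have hMod : condMod current mf p.1 = false := by
                simp [condMod, hmf, hcons, hmt, eq_false hme, hmd, eq_true hde]
              have hstep : clStep (a, b, c) (p.1, (some p.2, some prev)) = (a, b, c) := by
               simp [clStep, hmt, eq_false hme, hmd, eq_true hde]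
              rw [hstep, ih a b c hnd.2 hlk' hfa' hfb']
              simp [hMod]
            · have hMod : condMod current mf p.1 = true := by
                simp [condMod, hmf, hcons, hmt, eq_false hme, hmd, eq_false hde]
              have hstep : clStep (a, b, c) (p.1, (some p.2, some prev)) = (a, b ++ [p.1], c) := by
                simp [clStep, hmt, eq_false hme, hmd, eq_false hde,
                  PySem.Set.add_of_not_mem (hfb p (List.mem_cons_self ..))]
              rw [hstep, ih a (b ++ [p.1]) c hnd.2 hlk' hfa' hfrbN]
              simp [hMod]

-- B's classification pass over the manifest-only joined rows: each goes to deleted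
lemma dfold_eq :
    ∀ (l : List (String × PRec)) (a b c : List String),
      (l.map Prod.fst).Nodup → (∀ q ∈ l, q.1 ∉ c) →
      l.foldl (fun acc q => clStep acc (q.1, ((none : Option PRec), some q.2))) (a, b, c)
      = (a, b, c ++ l.map Prod.fst) := by
  intro l
  induction l with
  | nil => simp
  | cons q r ih =>
    intro a b c hnd hfr
    rw [List.map_cons, List.nodup_cons] at hnd
    have hstep : clStep (a, b, c) (q.1, (none, some q.2)) = (a, b, c ++ [q.1]) := by
      simp [clStep, PySem.Set.add_of_not_mem (hfr q (List.mem_cons_self ..))]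
    rw [List.foldl_cons, hstep, ih a b (c ++ [q.1]) hnd.2 (by
      intro m hm
      simp only [List.mem_append, List.mem_singleton]
      rintro (h | h1)
      · exact hfr m (List.mem_cons_of_mem _ hm) h
      · exact hnd.1 (h1 ▸ List.mem_map_of_mem hm))]
    simp

-- B computes the canonical value
lemma b_canon (current : List (String × PRec)) (manifest : List (String × List (String × PRec)))
    (h1 : (current.map Prod.fst).Nodup) (h2 : ((mfilesOf manifest).map Prod.fst).Nodup) :
    diff_files_alt current manifest = canonOf current (mfilesOf manifest) := by
  simp only [diff_files_alt, canonOf]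
  have hfresh : ∀ p ∈ current,
      (PySem.Dict.empty : PySem.Dict String (Option PRec × Option PRec)).contains p.1 = false := by
    intro p _
    simp
  have hitems1 : (current.foldl (fun d p => d.insert p.1 ((some p.2, (none : Option PRec)))) PySem.Dict.empty).items
      = current.map (fun p => (p.1, ((some p.2 : Option PRec), (none : Option PRec)))) := by
    rw [PySem.Dict.items_foldl_insert_fresh current Prod.fst
      (fun p => ((some p.2 : Option PRec), (none : Option PRec))) _ hfresh h1]
    rfl
  have hkeys1 : (current.foldl (fun d p => d.insert p.1 ((some p.2, (none : Option PRec)))) PySem.Dict.empty).keys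
      = current.map Prod.fst := by
    simp only [PySem.Dict.keys, hitems1, List.map_map]
    rfl
  have hnd1 : (current.foldl (fun d p => d.insert p.1 ((some p.2, (none : Option PRec)))) PySem.Dict.empty).keys.Nodup := by
    rw [hkeys1]; exact h1
  rw [items_join2 (mfilesOf manifest) _ hnd1 h2, hitems1, List.map_map, List.foldl_append]
  -- the current-side rows carry (some cur, manifest lookup)
  have hrows : ∀ p ∈ current,
      ((fun e => (e.1, (e.2.1, ((PySem.Dict.mk (mfilesOf manifest)).get? e.1).elim e.2.2 some))) ∘
        (fun p => (p.1, ((some p.2 : Option PRec), (none : Option PRec))))) p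
      = (p.1, ((some p.2 : Option PRec), (PySem.Dict.mk (mfilesOf manifest)).get? p.1)) := by
    intro p _
    cases hg : (PySem.Dict.mk (mfilesOf manifest)).get? p.1 <;> simp [Function.comp, hg]
  rw [List.map_congr_left hrows]
  simp only [List.foldl_map]
  have hlook : ∀ p ∈ current, (PySem.Dict.mk current).get? p.1 = some p.2 := by
    intro p hp
    apply PySem.Dict.get?_of_mem_items <;> simp [PySem.Dict.keys, hp, h1]
  rw [show (PySem.Set.empty, PySem.Set.empty, PySem.Set.empty)
      = (([] : List String), ([] : List String), ([] : List String)) from rfl]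
  rw [cfold_eq current (mfilesOf manifest) current [] [] [] h1 hlook (by simp) (by simp)]
  have hsubnd : ((mfilesOf manifest).filter (fun q =>
      !(current.foldl (fun d p => d.insert p.1 ((some p.2, (none : Option PRec)))) PySem.Dict.empty).contains q.1)).map Prod.fst
      |>.Nodup :=
    h2.sublist ((List.filter_sublist).map Prod.fst)
  rw [dfold_eq _ _ _ _ hsubnd (by simp)]
  simp only [List.nil_append, Prod.mk.injEq]
  refine ⟨trivial, trivial, ?_⟩
  -- deleted: the manifest-only rows are exactly the manifest names absent from current
  have hcont : ∀ q ∈ mfilesOf manifest,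
      (!(current.foldl (fun d p => d.insert p.1 ((some p.2, (none : Option PRec)))) PySem.Dict.empty).contains q.1)
      = (!(PySem.Dict.mk current).contains q.1) := by
    intro q _
    rw [PySem.Dict.contains_eq_decide_mem_keys, PySem.Dict.contains_eq_decide_mem_keys, hkeys1]
    simp [PySem.Dict.keys]
  rw [List.filter_congr hcont, List.filter_map]
  rfl

-- A computes the canonical value
lemma a_canon (current : List (String × PRec)) (manifest : List (String × List (String × PRec)))
    (hpre : Pre_diff_files current manifest) :
    diff_files current manifest = canonOf current (mfilesOf manifest) := by
  obtain ⟨h1, h2, -⟩ := hpre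
  have hlook : ∀ p ∈ current, (PySem.Dict.mk current).get? p.1 = some p.2 := by
    intro p hp
    apply PySem.Dict.get?_of_mem_items <;> simp [PySem.Dict.keys, hp, h1]
  simp only [diff_files, canonOf]
  simp only [PySem.Set.empty]
  rw [PySem.Set.ofList_eq_self_of_nodup _ h1, set_diff_eq_filter, set_diff_eq_filter,
    set_inter_eq_filter]
  simp only [Prod.mk.injEq]
  refine ⟨?_, ?_, ?_⟩
  · -- new files
    apply List.filter_congr
    intro n _
    cases hg : (PySem.Dict.mk (mfilesOf manifest)).get? n with
    | none =>
      have hn := (get?_mk_eq_none_iff _ _).mp hg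
      simp [PySem.Set.mem_ofList, hn]
    | some v =>
      have hn : n ∈ (mfilesOf manifest).map Prod.fst := by
        by_contra hc
        rw [(get?_mk_eq_none_iff _ _).mpr hc] at hg
        cases hg
      simp [PySem.Set.mem_ofList, hn]
  · -- modified files
    rw [PySem.List.foldl_congr_mem _ _
        (fun acc n => if condMod current (mfilesOf manifest) n then PySem.Set.add acc n else acc) _ ?hbody]
    case hbody =>
      intro acc n hn
      have hmem : n ∈ (mfilesOf manifest).map Prod.fst := by
        have h := (List.mem_filter.mp hn).2
        simpa [set_contains_eq, PySem.Set.mem_ofList] using h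
      obtain ⟨prev, hprev⟩ : ∃ prev, (PySem.Dict.mk (mfilesOf manifest)).get? n = some prev := by
        cases hg : (PySem.Dict.mk (mfilesOf manifest)).get? n with
        | none => exact absurd ((get?_mk_eq_none_iff _ _).mp hg) (by simpa using hmem)
        | some v => exact ⟨v, rfl⟩
      cases hmt : (PySem.Dict.mk (((PySem.Dict.mk current).get? n).getD [])).get? "mtime" with
      | none => simp [modStep, condMod, hprev, hmt]
      | some m =>
        by_cases hme : some m = (PySem.Dict.mk prev).get? "mtime"
        · simp [modStep, condMod, hprev, hmt, eq_true hme]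
        · cases hmd : (PySem.Dict.mk (((PySem.Dict.mk current).get? n).getD [])).get? "md5" with
          | none => simp [modStep, condMod, hprev, hmt, eq_false hme, hmd]
          | some d =>
            by_cases hde : some d = (PySem.Dict.mk prev).get? "md5"
            · simp [modStep, condMod, hprev, hmt, eq_false hme, hmd, eq_true hde]
            · simp [modStep, condMod, hprev, hmt, eq_false hme, hmd, eq_false hde]
    rw [foldl_add_if_filter _ _ [] (List.Nodup.filter _ h1) (by simp), List.filter_filter,
      List.nil_append]
    apply List.filter_congr
    intro n _
    cases hg : (PySem.Dict.mk (mfilesOf manifest)).get? n with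
    | none =>
      have hMod : condMod current (mfilesOf manifest) n = false := by simp [condMod, hg]
      simp [hMod]
    | some prev =>
      have hn : n ∈ (mfilesOf manifest).map Prod.fst := by
        by_contra hc
        rw [(get?_mk_eq_none_iff _ _).mpr hc] at hg
        cases hg
      simp [PySem.Set.mem_ofList, hn]
  · -- deleted files
    rw [PySem.Set.ofList_eq_self_of_nodup _ h2]
    apply List.filter_congr
    intro n _
    rw [set_contains_eq, PySem.Dict.contains_eq_decide_mem_keys]
    simp [PySem.Dict.keys]

-- ===== VERDICT (by name: the statement is the Claim_ definition above) =====
theorem diff_files_spec : Claim_equal_diff_files := by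
  intro current manifest _ hpre
  unfold Spec_diff_files
  rw [a_canon current manifest hpre, b_canon current manifest hpre.1 hpre.2.1]
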